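-- pv_equiv track=rewrite | github.com/drgnfrts/IS111 | practice_papers/M1LT2/q1b.py | find_second_letter
-- ===== SOURCE A (Python) =====
-- def find_second_letter(my_str):
--     # Write your code below
--     count = 0
--     for i in range(len(my_str)):
--         if my_str[i].isalpha():
--             count += 1
--         if count == 2:
--             return i
--     return -1
-- ===== SOURCE B (Python) =====
-- def find_second_letter(my_str):
--     idxs = [i for i, c in enumerate(my_str) if c.isalpha()]
--     return idxs[1] if len(idxs) >= 2 else -1
-- ===== Notes on version B (the rewrite author's own statement) =====
-- stated objective: simpler
-- what changed: Replaces the scan with a running counter and early return by a collect-then-index decomposition: build the list of alphabetic positions once, then select the second element if it exists.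
import Mathlib
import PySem

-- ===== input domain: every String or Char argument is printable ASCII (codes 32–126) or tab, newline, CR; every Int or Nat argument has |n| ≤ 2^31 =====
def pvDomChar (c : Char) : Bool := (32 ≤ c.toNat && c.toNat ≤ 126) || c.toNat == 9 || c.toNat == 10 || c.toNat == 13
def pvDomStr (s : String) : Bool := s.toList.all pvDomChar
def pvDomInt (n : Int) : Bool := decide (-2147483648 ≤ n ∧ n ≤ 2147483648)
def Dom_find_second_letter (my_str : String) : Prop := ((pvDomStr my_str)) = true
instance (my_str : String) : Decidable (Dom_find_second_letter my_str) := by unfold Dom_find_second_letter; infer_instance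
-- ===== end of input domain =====

-- B replaces A's counter-scan with early return by collecting the alphabetic positions and indexing the second one (objective: simpler).

-- ===== PORT A =====
-- A's 'for i in range(len(my_str))' with my_str[i]: structural recursion over the chars carrying the index i and the counter.
def pvLoopA : List Char → Int → Int → Int
  | [], _, _ => -1
  | c :: cs, i, count =>
    let count := if PySem.Chars.isalpha c then count + 1 else count
    if count == 2 then i else pvLoopA cs (i + 1) count

def find_second_letter (my_str : String) : Int := pvLoopA my_str.toList 0 0

-- ===== PORT B =====
def find_second_letter_alt (my_str : String) : Int :=
  let idxs := ((PySem.List.enumerate my_str.toList 0).filter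
                 (fun p => PySem.Chars.isalpha p.2)).map (·.1)
  if 2 ≤ idxs.length then idxs.getD 1 (-1) else -1

-- ===== PRECONDITION & SPEC =====
def Spec_find_second_letter (my_str : String) (out : Int) : Prop := out = find_second_letter_alt my_str
instance (my_str : String) (out : Int) : Decidable (Spec_find_second_letter my_str out) := by unfold Spec_find_second_letter; infer_instance

-- ===== CLAIM (what is proved, stated in full; the proofs are below) =====
def Claim_equal_find_second_letter : Prop := ∀ (my_str : String), Dom_find_second_letter my_str → Spec_find_second_letter my_str (find_second_letter my_str)

-- ===== LEMMAS AND PROOFS =====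

def pvAlphaIdx (cs : List Char) (i : Int) : List Int :=
  ((PySem.List.enumerate cs i).filter (fun p => PySem.Chars.isalpha p.2)).map (·.1)

theorem pvAlphaIdx_cons (c : Char) (cs : List Char) (i : Int) :
    pvAlphaIdx (c :: cs) i =
      if PySem.Chars.isalpha c then i :: pvAlphaIdx cs (i + 1) else pvAlphaIdx cs (i + 1) := by
  simp [pvAlphaIdx, PySem.List.enumerate_cons, List.filter]
  split_ifs with h <;> simp_all

theorem pvLoopA_one (cs : List Char) (i : Int) :
    pvLoopA cs i 1 = (pvAlphaIdx cs i).getD 0 (-1) := by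
  induction cs generalizing i with
  | nil => rfl
  | cons c cs ih =>
    rw [pvAlphaIdx_cons]
    by_cases h : PySem.Chars.isalpha c <;> simp [pvLoopA, h, ih]

theorem pvLoopA_zero (cs : List Char) (i : Int) :
    pvLoopA cs i 0 = (pvAlphaIdx cs i).getD 1 (-1) := by
  induction cs generalizing i with
  | nil => rfl
  | cons c cs ih =>
    rw [pvAlphaIdx_cons]
    by_cases h : PySem.Chars.isalpha c
    · simp [pvLoopA, h, pvLoopA_one]
    · simp [pvLoopA, h, ih]

-- ===== VERDICT (by name: the statement is the Claim_ definition above) =====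
theorem find_second_letter_spec : Claim_equal_find_second_letter := by
  intro s _
  unfold Spec_find_second_letter find_second_letter find_second_letter_alt
  rw [pvLoopA_zero]
  show (pvAlphaIdx s.toList 0).getD 1 (-1) =
    (if 2 ≤ (pvAlphaIdx s.toList 0).length then (pvAlphaIdx s.toList 0).getD 1 (-1) else -1)
  split_ifs with h
  · rfl
  · simp [List.getD, List.getElem?_eq_none (by omega : (pvAlphaIdx s.toList 0).length ≤ 1)]
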